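-- pv_equiv track=rewrite | github.com/ritikZ18/REST-api | assignment_2.py | find_significant_energy_increase_brute
-- ===== SOURCE A (Python) =====
-- def find_significant_energy_increase_brute(A):
--
--     """
--     Return a tuple (i,j) where A[i:j] is the most significant energy increase
--     period.
--     we have to find the Max sum of subarray
--     1. First Compute the Difference from the current - previous
--     2. Find the Min and Max
--     2. FInd the maximum the sum(of differences) of subarray
--     3. Return the Array
--     time complexity = O(n^2)
--     """
--
--
--     n = len(A)
--     start_index = 0
--     end_index = 0
--     max_increase = float('-inf')
--
--     for i in range(n):
--         current_increase = 0
--         for j in range(i+1, n):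
--             current_increase += A[j] - A[j-1]  #Index 1 (minus) Index 2  + Adding up the differences
--             if current_increase > max_increase :
--                 max_increase = current_increase
--                 start_index = i
--                 end_index = j
--
--     return start_index, end_index
-- ===== SOURCE B (Python) =====
-- def find_significant_energy_increase_brute(A):
--     # One-pass O(n): the telescoping sum of differences over A[i..j] is A[j]-A[i],
--     # so track the earliest prefix minimum and take the first strict improvement.
--     n = len(A)
--     if n < 2:
--         return (0, 0)
--     best = None
--     bi = 0
--     bj = 0
--     min_val = A[0]
--     min_idx = 0
--     for j in range(1, n):
--         d = A[j] - min_val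
--         if best is None or d > best:
--             best = d
--             bi, bj = min_idx, j
--         if A[j] < min_val:
--             min_val = A[j]
--             min_idx = j
--     return (bi, bj)
-- ===== Notes on version B (the rewrite author's own statement) =====
-- stated objective: faster
-- what changed: A's nested loops re-sum telescoping differences (A[j]-A[i]) for every pair; B makes a single pass tracking the earliest prefix minimum and the first strict improvement of A[j]-min, returning the same lex-first maximizing pair.
import Mathlib
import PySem

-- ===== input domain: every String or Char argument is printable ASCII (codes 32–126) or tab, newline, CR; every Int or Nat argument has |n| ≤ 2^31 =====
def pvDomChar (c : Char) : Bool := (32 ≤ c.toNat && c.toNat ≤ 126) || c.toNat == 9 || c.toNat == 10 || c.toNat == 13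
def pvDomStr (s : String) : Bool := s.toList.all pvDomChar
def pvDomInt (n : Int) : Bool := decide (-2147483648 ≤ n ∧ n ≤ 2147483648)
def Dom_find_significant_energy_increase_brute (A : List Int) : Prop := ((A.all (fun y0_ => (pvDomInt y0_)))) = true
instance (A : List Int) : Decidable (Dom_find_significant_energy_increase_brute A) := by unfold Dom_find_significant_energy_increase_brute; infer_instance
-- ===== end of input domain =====

-- B replaces A's O(n^2) nested scan by a single O(n) pass tracking the earliest prefix minimum (objective: faster).

-- 'cur > max_increase' where max_increase starts as float('-inf'): none models -inf, so the comparison is true there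
def pyGT (c : Int) (m : Option Int) : Bool :=
  match m with
  | none => true
  | some v => decide (v < c)

-- ===== PORT A =====
-- inner loop body: current_increase += A[j] - A[j-1]; update (start,end,max) on strict improvement.
-- Every index used (j and j-1 with i+1 ≤ j < n) is in range, so List.getD is exact for A[j].
def innerStepA (A : List Int) (i : Nat) (s : Int × ((Nat × Nat) × Option Int)) (j : Nat) :
    Int × ((Nat × Nat) × Option Int) :=
  let cur := s.1 + (A.getD j 0 - A.getD (j - 1) 0)
  if pyGT cur s.2.2 then (cur, ((i, j), some cur)) else (cur, s.2)

-- one iteration of the outer loop: run j over range(i+1, n) with current_increase = 0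
def outerStepA (A : List Int) (s : (Nat × Nat) × Option Int) (i : Nat) : (Nat × Nat) × Option Int :=
  ((List.range' (i + 1) (A.length - (i + 1))).foldl (innerStepA A i) (0, s)).2

def find_significant_energy_increase_brute (A : List Int) : Int × Int :=
  let r := (List.range A.length).foldl (outerStepA A) ((0, 0), none)
  ((r.1.1 : Int), (r.1.2 : Int))

-- ===== PORT B =====
-- state: ((best pair, best diff as Option), (min_val, min_idx)); best is None-initialised as in Source B
def stepB (A : List Int) (s : ((Nat × Nat) × Option Int) × (Int × Nat)) (j : Nat) :
    ((Nat × Nat) × Option Int) × (Int × Nat) :=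
  let d := A.getD j 0 - s.2.1
  let best := if pyGT d s.1.2 then ((s.2.2, j), some d) else s.1
  let mn := if A.getD j 0 < s.2.1 then (A.getD j 0, j) else s.2
  (best, mn)

def find_significant_energy_increase_brute_alt (A : List Int) : Int × Int :=
  if A.length < 2 then (0, 0)
  else
    let r := (List.range' 1 (A.length - 1)).foldl (stepB A) (((0, 0), none), (A.getD 0 0, 0))
    ((r.1.1.1 : Int), (r.1.1.2 : Int))

-- ===== PRECONDITION & SPEC =====
def Spec_find_significant_energy_increase_brute (A : List Int) (out : Int × Int) : Prop := out = find_significant_energy_increase_brute_alt A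
instance (A : List Int) (out : Int × Int) : Decidable (Spec_find_significant_energy_increase_brute A out) := by unfold Spec_find_significant_energy_increase_brute; infer_instance

-- ===== CLAIM (what is proved, stated in full; the proofs are below) =====
def Claim_equal_find_significant_energy_increase_brute : Prop := ∀ (A : List Int), Dom_find_significant_energy_increase_brute A → Spec_find_significant_energy_increase_brute A (find_significant_energy_increase_brute A)

-- ===== LEMMAS AND PROOFS =====

-- value at index k (all indices used are in range, so getD is exact)
def aIdx (A : List Int) (k : Nat) : Int := A.getD k 0

-- abstract "keep the first strict maximizer" step over candidates ((i,j), value)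
def fmStep (s : (Nat × Nat) × Option Int) (c : (Nat × Nat) × Int) : (Nat × Nat) × Option Int :=
  if pyGT c.2 s.2 then (c.1, some c.2) else s

def candA (A : List Int) (i j : Nat) : (Nat × Nat) × Int := ((i, j), aIdx A j - aIdx A i)

-- all pairs i < j < n in the lexicographic order A visits them
def lexCands (A : List Int) : List ((Nat × Nat) × Int) :=
  (List.range A.length).flatMap (fun i => (List.range' (i + 1) (A.length - (i + 1))).map (candA A i))

-- earliest prefix minimum of A[0..k] as (value, index)
def mp (A : List Int) : Nat → Int × Nat
  | 0 => (aIdx A 0, 0)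
  | k + 1 => if aIdx A (k + 1) < (mp A k).1 then (aIdx A (k + 1), k + 1) else mp A k

def candB (A : List Int) (j : Nat) : (Nat × Nat) × Int :=
  (((mp A (j - 1)).2, j), aIdx A j - (mp A (j - 1)).1)

def bCands (A : List Int) : List ((Nat × Nat) × Int) := (List.range' 1 (A.length - 1)).map (candB A)

def lexLt (c c' : (Nat × Nat) × Int) : Prop :=
  c.1.1 < c'.1.1 ∨ (c.1.1 = c'.1.1 ∧ c.1.2 < c'.1.2)

-- A's inner loop telescopes: current_increase at j is A[j] - A[i]
lemma innerA_eq (A : List Int) (i : Nat) :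
    ∀ (m k : Nat) (s : (Nat × Nat) × Option Int) (c : Int),
      c = aIdx A (k - 1) - aIdx A i →
      ((List.range' k m).foldl (innerStepA A i) (c, s)).2 =
        ((List.range' k m).map (candA A i)).foldl fmStep s := by
  intro m
  induction m with
  | zero => intro k s c _; simp
  | succ m ih =>
    intro k s c hc
    rw [List.range'_succ]
    have hcur : c + (A.getD k 0 - A.getD (k - 1) 0) = aIdx A k - aIdx A i := by
      simp [aIdx] at hc ⊢; omega
    simp only [List.foldl_cons, List.map_cons, innerStepA, hcur]
    by_cases h : pyGT (aIdx A k - aIdx A i) s.2 = true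
    · simp only [h, fmStep, candA]
      exact ih (k + 1) _ _ (by simp)
    · simp only [fmStep, candA, if_neg h]
      exact ih (k + 1) _ _ (by simp)

-- A's whole computation is the first-strict-max fold over lexCands
lemma outerA_eq (A : List Int) :
    ∀ (l : List Nat) (s : (Nat × Nat) × Option Int),
      l.foldl (outerStepA A) s =
        (l.flatMap (fun i => (List.range' (i + 1) (A.length - (i + 1))).map (candA A i))).foldl fmStep s := by
  intro l
  induction l with
  | nil => intro s; simp
  | cons i l ih =>
    intro s
    simp only [List.foldl_cons, List.flatMap_cons, List.foldl_append]
    rw [outerStepA, innerA_eq A i _ _ s 0 (by simp [aIdx]), ih]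

lemma portA_eq (A : List Int) :
    find_significant_energy_increase_brute A =
      ((((lexCands A).foldl fmStep ((0, 0), none)).1.1 : Int),
       (((lexCands A).foldl fmStep ((0, 0), none)).1.2 : Int)) := by
  simp [find_significant_energy_increase_brute, outerA_eq, lexCands]

-- B's pass is the first-strict-max fold over bCands, with the min-state tracking mp
lemma foldB_eq (A : List Int) :
    ∀ (k : Nat) (s0 : (Nat × Nat) × Option Int),
      (List.range' 1 k).foldl (stepB A) (s0, (A.getD 0 0, 0)) =
        (((List.range' 1 k).map (candB A)).foldl fmStep s0, mp A k) := by
  intro k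
  induction k with
  | zero => intro s0; simp [mp, aIdx]
  | succ k ih =>
    intro s0
    rw [List.range'_1_concat]
    simp only [List.foldl_append, List.map_append, List.foldl_cons, List.foldl_nil, ih,
      List.map_cons, List.map_nil]
    show stepB A (_, mp A k) (1 + k) = _
    have h1k : 1 + k = k + 1 := by omega
    rw [h1k]
    simp only [stepB, fmStep, candB, mp, aIdx]
    simp

lemma portB_eq (A : List Int) (h2 : 2 ≤ A.length) :
    find_significant_energy_increase_brute_alt A =
      ((((bCands A).foldl fmStep ((0, 0), none)).1.1 : Int),
       (((bCands A).foldl fmStep ((0, 0), none)).1.2 : Int)) := by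
  rw [find_significant_energy_increase_brute_alt, if_neg (by omega)]
  rw [foldB_eq A (A.length - 1) ((0, 0), none)]
  rfl

-- characterization of the first-strict-max fold, some-initialised
lemma fm_some :
    ∀ (cs : List ((Nat × Nat) × Int)) (p : Nat × Nat) (v : Int),
      (cs.foldl fmStep (p, some v) = (p, some v) ∧ ∀ c ∈ cs, c.2 ≤ v) ∨
        ∃ l1 c l2, cs = l1 ++ c :: l2 ∧ cs.foldl fmStep (p, some v) = (c.1, some c.2) ∧
          v < c.2 ∧ (∀ x ∈ l1, x.2 < c.2) ∧ (∀ x ∈ l2, x.2 ≤ c.2) := by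
  intro cs
  induction cs with
  | nil => intro p v; left; simp
  | cons c cs ih =>
    intro p v
    by_cases h : v < c.2
    · right
      have hstep : fmStep (p, some v) c = (c.1, some c.2) := by
        simp [fmStep, pyGT, h]
      rcases ih c.1 c.2 with ⟨heq, hle⟩ | ⟨l1, c', l2, hsplit, heq, hlt, hl1, hl2⟩
      · exact ⟨[], c, cs, by simp, by simp [hstep, heq], h, by simp, hle⟩
      · refine ⟨c :: l1, c', l2, by simp [hsplit], by simp [hstep, heq], lt_trans h hlt, ?_, hl2⟩
        intro x hx
        rcases List.mem_cons.mp hx with rfl | hx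
        · exact hlt
        · exact hl1 x hx
    · have hstep : fmStep (p, some v) c = (p, some v) := by
        simp [fmStep, pyGT, h]
      rcases ih p v with ⟨heq, hle⟩ | ⟨l1, c', l2, hsplit, heq, hlt, hl1, hl2⟩
      · left
        refine ⟨by simp [hstep, heq], ?_⟩
        intro x hx
        rcases List.mem_cons.mp hx with rfl | hx
        · omega
        · exact hle x hx
      · right
        refine ⟨c :: l1, c', l2, by simp [hsplit], by simp [hstep, heq], hlt, ?_, hl2⟩
        intro x hx
        rcases List.mem_cons.mp hx with rfl | hx
        · omega
        · exact hl1 x hx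

-- characterization of the fold from the None-initialised state
lemma fm_none (cs : List ((Nat × Nat) × Int)) (p0 : Nat × Nat) (hne : cs ≠ []) :
    ∃ l1 c l2, cs = l1 ++ c :: l2 ∧ cs.foldl fmStep (p0, none) = (c.1, some c.2) ∧
      (∀ x ∈ l1, x.2 < c.2) ∧ (∀ x ∈ l2, x.2 ≤ c.2) := by
  cases cs with
  | nil => exact absurd rfl hne
  | cons c cs =>
    have hstep : fmStep (p0, none) c = (c.1, some c.2) := by simp [fmStep, pyGT]
    rcases fm_some cs c.1 c.2 with ⟨heq, hle⟩ | ⟨l1, c', l2, hsplit, heq, hlt, hl1, hl2⟩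
    · exact ⟨[], c, cs, by simp, by simp [hstep, heq], by simp, hle⟩
    · refine ⟨c :: l1, c', l2, by simp [hsplit], by simp [hstep, heq], ?_, hl2⟩
      intro x hx
      rcases List.mem_cons.mp hx with rfl | hx
      · exact hlt
      · exact hl1 x hx

lemma mem_lexCands (A : List Int) (c : (Nat × Nat) × Int) :
    c ∈ lexCands A ↔ ∃ i j, i < j ∧ j < A.length ∧ c = candA A i j := by
  constructor
  · intro hc
    rcases List.mem_flatMap.mp hc with ⟨i, hi, hc⟩
    rcases List.mem_map.mp hc with ⟨j, hj, rfl⟩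
    have hj' := List.mem_range'_1.mp hj
    exact ⟨i, j, by omega, by have := List.mem_range.mp hi; omega, rfl⟩
  · rintro ⟨i, j, hij, hjn, rfl⟩
    refine List.mem_flatMap.mpr ⟨i, List.mem_range.mpr (by omega), ?_⟩
    exact List.mem_map.mpr ⟨j, List.mem_range'_1.mpr (by omega), rfl⟩

lemma mem_bCands (A : List Int) (c : (Nat × Nat) × Int) :
    c ∈ bCands A ↔ ∃ j, 1 ≤ j ∧ j < A.length ∧ c = candB A j := by
  constructor
  · intro hc
    rcases List.mem_map.mp hc with ⟨j, hj, rfl⟩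
    have hj' := List.mem_range'_1.mp hj
    exact ⟨j, by omega, by omega, rfl⟩
  · rintro ⟨j, h1, h2, rfl⟩
    exact List.mem_map.mpr ⟨j, List.mem_range'_1.mpr (by omega), rfl⟩

lemma pairwise_lexCands (A : List Int) : (lexCands A).Pairwise lexLt := by
  have hblock : ∀ i : Nat, ((List.range' (i + 1) (A.length - (i + 1))).map (candA A i)).Pairwise lexLt := by
    intro i
    refine List.Pairwise.map _ ?_ (List.pairwise_lt_range' ..)
    intro a b hab
    exact Or.inr ⟨rfl, hab⟩
  have : ∀ l : List Nat, l.Pairwise (· < ·) →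
      (l.flatMap (fun i => (List.range' (i + 1) (A.length - (i + 1))).map (candA A i))).Pairwise lexLt := by
    intro l
    induction l with
    | nil => intro _; simp
    | cons i l ih =>
      intro hp
      rw [List.pairwise_cons] at hp
      rw [List.flatMap_cons]
      refine List.pairwise_append.mpr ⟨hblock i, ih hp.2, ?_⟩
      intro x hx y hy
      rcases List.mem_map.mp hx with ⟨j, _, rfl⟩
      rcases List.mem_flatMap.mp hy with ⟨i', hi', hy⟩
      rcases List.mem_map.mp hy with ⟨j', _, rfl⟩
      exact Or.inl (hp.1 i' hi')
  exact this _ (List.pairwise_lt_range ..)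

lemma pairwise_bCands (A : List Int) : (bCands A).Pairwise (fun c c' => c.1.2 < c'.1.2) := by
  refine List.Pairwise.map _ ?_ (List.pairwise_lt_range' ..)
  intro a b hab
  simpa [candB] using hab

-- in a pairwise-sorted split, l1 is before c and l2 after c
lemma split_rel {R : ((Nat × Nat) × Int) → ((Nat × Nat) × Int) → Prop}
    {l1 l2 : List ((Nat × Nat) × Int)} {c : (Nat × Nat) × Int}
    (h : (l1 ++ c :: l2).Pairwise R) : (∀ x ∈ l1, R x c) ∧ (∀ x ∈ l2, R c x) := by
  rw [List.pairwise_append] at h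
  have h2 := List.pairwise_cons.mp h.2.1
  exact ⟨fun x hx => h.2.2 x hx c (List.mem_cons_self ..), h2.1⟩

lemma mp_spec (A : List Int) (j : Nat) :
    (mp A j).2 ≤ j ∧ aIdx A (mp A j).2 = (mp A j).1 ∧
      (∀ k, k ≤ j → (mp A j).1 ≤ aIdx A k) ∧ (∀ k, k < (mp A j).2 → (mp A j).1 < aIdx A k) := by
  induction j with
  | zero => refine ⟨le_refl _, rfl, ?_, by simp [mp]⟩; intro k hk; interval_cases k; simp [mp]
  | succ j ih =>
    obtain ⟨h1, h2, h3, h4⟩ := ih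
    by_cases h : aIdx A (j + 1) < (mp A j).1
    · have hm : mp A (j + 1) = (aIdx A (j + 1), j + 1) := by rw [mp, if_pos h]
      rw [hm]
      refine ⟨le_refl _, rfl, ?_, ?_⟩
      · intro k hk
        rcases Nat.lt_succ_iff_lt_or_eq.mp (Nat.lt_succ_of_le hk) with hk' | rfl
        · exact le_of_lt (lt_of_lt_of_le h (h3 k (by omega)))
        · exact le_refl _
      · intro k hk
        exact lt_of_lt_of_le h (h3 k (by omega))
    · have hm : mp A (j + 1) = mp A j := by rw [mp, if_neg h]
      rw [hm]
      refine ⟨by omega, h2, ?_, h4⟩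
      intro k hk
      rcases Nat.lt_succ_iff_lt_or_eq.mp (Nat.lt_succ_of_le hk) with hk' | rfl
      · exact h3 k (by omega)
      · omega

lemma lexLt_asymm {x y : (Nat × Nat) × Int} (h : lexLt x y) (h' : lexLt y x) : False := by
  rcases h with h | ⟨h1, h2⟩ <;> rcases h' with h' | ⟨h1', h2'⟩ <;> omega

-- the main equivalence for n ≥ 2
lemma main_eq (A : List Int) (h2 : 2 ≤ A.length) :
    find_significant_energy_increase_brute A = find_significant_energy_increase_brute_alt A := by
  -- analyse A's fold over lexCands
  have hmem01 : candA A 0 1 ∈ lexCands A := (mem_lexCands A _).mpr ⟨0, 1, by omega, by omega, rfl⟩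
  have hneL : lexCands A ≠ [] := by intro h; rw [h] at hmem01; exact absurd hmem01 (by simp)
  obtain ⟨l1, cc, l2, hsplit, hfold, hl1, hl2⟩ := fm_none (lexCands A) (0, 0) hneL
  obtain ⟨i1, j1, hij, hjn, hcc⟩ := (mem_lexCands A cc).mp (hsplit ▸ (by simp : cc ∈ l1 ++ cc :: l2))
  -- cc is a maximum over all candidates
  have hmax : ∀ x ∈ lexCands A, x.2 ≤ cc.2 := by
    intro x hx
    rw [hsplit] at hx
    rcases List.mem_append.mp hx with hx | hx
    · exact le_of_lt (hl1 x hx)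
    · rcases List.mem_cons.mp hx with rfl | hx
      · exact le_refl _
      · exact hl2 x hx
  -- strictly greater than everything lexicographically before it
  have hstrict : ∀ x ∈ lexCands A, lexLt x cc → x.2 < cc.2 := by
    intro x hx hlex
    have hp := pairwise_lexCands A
    rw [hsplit] at hp hx
    rcases List.mem_append.mp hx with hx | hx
    · exact hl1 x hx
    · rcases List.mem_cons.mp hx with rfl | hx
      · exact absurd hlex (fun h => lexLt_asymm h h)
      · exact absurd hlex (fun h => lexLt_asymm h ((split_rel hp).2 x hx))
  have hccv : cc.2 = aIdx A j1 - aIdx A i1 := by rw [hcc]; rfl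
  -- the earliest prefix minimum before j1 is exactly (A[i1], i1)
  obtain ⟨hm1, hm2, hm3, hm4⟩ := mp_spec A (j1 - 1)
  set v := (mp A (j1 - 1)).1 with hv
  set m := (mp A (j1 - 1)).2 with hmdef
  have hmj1 : m < j1 := by omega
  have hvle : v ≤ aIdx A i1 := hm3 i1 (by omega)
  have hmemm : candA A m j1 ∈ lexCands A := (mem_lexCands A _).mpr ⟨m, j1, hmj1, hjn, rfl⟩
  have hminv : aIdx A i1 ≤ v := by
    have := hmax _ hmemm
    rw [hccv] at this
    simp only [candA] at this
    rw [← hm2]; omega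
  have hveq : v = aIdx A i1 := le_antisymm hvle hminv
  have hmeq : m = i1 := by
    rcases lt_trichotomy m i1 with h | h | h
    · -- m < i1: (m, j1) is lex-before cc, so strictly smaller, contradicting min
      have := hstrict _ hmemm (by rw [hcc]; exact Or.inl h)
      rw [hccv] at this
      simp only [candA] at this
      rw [← hm2] at hveq
      omega
    · exact h
    · -- i1 < m: earliest-min property gives v < A[i1], contradicting hveq
      have := hm4 i1 h
      omega
  have hccB : candB A j1 = cc := by
    rw [hcc, candB, candA, ← hmdef, ← hv, hmeq, hveq]
  have hmemB : cc ∈ bCands A := (mem_bCands A cc).mpr ⟨j1, by omega, hjn, hccB.symm⟩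
  -- analyse B's fold over bCands
  have hneB : bCands A ≠ [] := by intro h; rw [h] at hmemB; exact absurd hmemB (by simp)
  obtain ⟨m1, cb, m2, hsplitB, hfoldB, hbl1, hbl2⟩ := fm_none (bCands A) (0, 0) hneB
  have hcbmem : cb ∈ bCands A := hsplitB ▸ (by simp : cb ∈ m1 ++ cb :: m2)
  obtain ⟨jb, hjb1, hjbn, hcb⟩ := (mem_bCands A cb).mp hcbmem
  -- every bCands value is a lexCands value, so ≤ cc.2
  have hcble : cb.2 ≤ cc.2 := by
    obtain ⟨hb1, hb2, _, _⟩ := mp_spec A (jb - 1)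
    have : candA A (mp A (jb - 1)).2 jb ∈ lexCands A :=
      (mem_lexCands A _).mpr ⟨(mp A (jb - 1)).2, jb, by omega, hjbn, rfl⟩
    have hle := hmax _ this
    rw [hcb]
    simp only [candB, candA] at *
    omega
  -- cc and cb coincide
  have hcbeq : cb = cc := by
    rw [hsplitB] at hmemB
    rcases List.mem_append.mp hmemB with hx | hx
    · -- cc strictly below cb, yet cb ≤ cc: impossible
      have := hbl1 cc hx
      omega
    · rcases List.mem_cons.mp hx with h | hx
      · exact h.symm
      · -- cc after cb in bCands: jb < j1 and cc.2 ≤ cb.2, so cb.2 = cc.2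
        exfalso
        have hp := pairwise_bCands A
        rw [hsplitB] at hp
        have hjblt : jb < j1 := by
          have := (split_rel hp).2 cc hx
          rw [hcb, hcc] at this
          simpa [candB, candA] using this
        have hccle := hbl2 cc hx
        have hcbv : cb.2 = cc.2 := le_antisymm hcble hccle
        -- cb = candB A jb with value cc.2: contradiction by cases on its min index vs i1
        obtain ⟨hb1, hb2, hb3, hb4⟩ := mp_spec A (jb - 1)
        set mb := (mp A (jb - 1)).2 with hmbdef
        set vb := (mp A (jb - 1)).1 with hvbdef
        have hmbjb : mb < jb := by omega
        have hcbval : cb.2 = aIdx A jb - vb := by rw [hcb]; rfl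
        have hmemmb : candA A mb jb ∈ lexCands A :=
          (mem_lexCands A _).mpr ⟨mb, jb, hmbjb, hjbn, rfl⟩
        rcases lt_trichotomy mb i1 with h | h | h
        · -- (mb, jb) lex-before (i1, j1): strictly smaller value
          have := hstrict _ hmemmb (by rw [hcc]; exact Or.inl h)
          rw [hccv] at this
          simp only [candA] at this
          rw [hccv, hcbval, ← hb2] at hcbv
          omega
        · -- same i: jb < j1 makes it lex-before: strictly smaller value
          have := hstrict _ hmemmb (by rw [hcc]; exact Or.inr ⟨h, hjblt⟩)
          rw [hccv] at this
          simp only [candA] at this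
          rw [hccv, hcbval, ← hb2] at hcbv
          omega
        · -- i1 < mb: then vb < A[i1], and (mb, j1) would beat the maximum
          have hvb : vb < aIdx A i1 := hb4 i1 h
          have hmemm2 : candA A mb j1 ∈ lexCands A :=
            (mem_lexCands A _).mpr ⟨mb, j1, by omega, hjn, rfl⟩
          have := hmax _ hmemm2
          rw [hccv] at this
          simp only [candA] at this
          rw [← hb2] at hvb
          omega
  rw [portA_eq, portB_eq A h2, hfold, hfoldB, hcbeq]

-- degenerate inputs: fewer than two samples
lemma small_eq (A : List Int) (h : A.length < 2) :
    find_significant_energy_increase_brute A = find_significant_energy_increase_brute_alt A := by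
  match A, h with
  | [], _ => rfl
  | [x], _ =>
    simp [find_significant_energy_increase_brute, find_significant_energy_increase_brute_alt,
      outerStepA, List.range_succ]

-- ===== VERDICT (by name: the statement is the Claim_ definition above) =====
theorem find_significant_energy_increase_brute_spec : Claim_equal_find_significant_energy_increase_brute := by
  intro A _
  show _ = _
  by_cases h : A.length < 2
  · exact small_eq A h
  · exact main_eq A (by omega)
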